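-- pv_equiv track=rewrite | github.com/100-hours-a-week/5-KCS-Algorithm-study | 4팀/sean/daily/NEXON-4.py | findMinWeight
-- ===== SOURCE A (Python) =====
-- import heapq
--
-- def findMinWeight(weights, d):
--     # 1. 최대 힙 구성 (heapq는 최소 힙이므로, 음수로 변환)
--     max_heap = [-w for w in weights]
--     heapq.heapify(max_heap)
--
--     # 2. d일 동안 반복하여 가장 무거운 초콜릿을 절반으로 줄임
--     for day in range(d):
--         if not max_heap:
--             break  # 더 이상 줄일 초콜릿이 없음
--
--         # 가장 무거운 초콜릿 꺼내기
--         current = -heapq.heappop(max_heap)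
--
--         # 절반으로 줄인 무게 계산 (floor(weight / 2)만큼 먹음)
--         eaten = current // 2
--         remaining = current - eaten  # 남은 무게는 weight - floor(weight / 2)
--
--         # 남은 무게가 0보다 크면 다시 힙에 삽입
--         if remaining > 0:
--             heapq.heappush(max_heap, -remaining)
--
--     # 3. 남은 초콜릿의 총 무게 계산
--     total_weight = -sum(max_heap)
--
--     return total_weight
-- ===== SOURCE B (Python) =====
-- def findMinWeight(weights, d):
--     # Sort once in descending order; each day pop the head (the maximum) and
--     # re-insert the halved remainder at its sorted position by linear scan.
--     items = sorted(weights, reverse=True)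
--     for _ in range(d):
--         if not items:
--             break
--         m = items.pop(0)
--         r = m - m // 2
--         if r > 0:
--             i = 0
--             while i < len(items) and items[i] >= r:
--                 i += 1
--             items.insert(i, r)
--     return sum(items)
-- ===== Notes on version B (the rewrite author's own statement) =====
-- stated objective: alternative
-- what changed: Replaces the negated max-heap with a list sorted once in descending order, popping the head each day and re-inserting the halved remainder at its sorted position by a linear scan.
import Mathlib
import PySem

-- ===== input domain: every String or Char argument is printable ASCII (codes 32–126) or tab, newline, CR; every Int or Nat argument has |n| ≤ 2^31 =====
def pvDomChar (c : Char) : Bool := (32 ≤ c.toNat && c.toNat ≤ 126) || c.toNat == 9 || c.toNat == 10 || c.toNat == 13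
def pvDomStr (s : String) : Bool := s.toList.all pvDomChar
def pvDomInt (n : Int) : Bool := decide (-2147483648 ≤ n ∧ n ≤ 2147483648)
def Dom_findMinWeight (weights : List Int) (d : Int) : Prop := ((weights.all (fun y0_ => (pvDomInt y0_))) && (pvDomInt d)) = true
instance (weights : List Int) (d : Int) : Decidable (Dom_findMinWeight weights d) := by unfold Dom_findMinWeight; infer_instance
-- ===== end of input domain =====

-- B replaces A's negated max-heap by a list sorted once in descending order,
-- popping the head each day and re-inserting the halved remainder at its sorted
-- position by a linear scan; alternative data structure, same outputs.


-- ===== PORT A =====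
-- heapq is ported by its library contract: the heap is the multiset of its elements,
-- heappop extracts the minimum (min? + remove?), heappush appends. The internal
-- array layout of the heap is not observable through the returned sum.
-- 'if not max_heap: break' coincides with min? returning none.
def fmwLoopA : Nat → List Int → List Int
  | 0, h => h
  | k+1, h =>
    match PySem.List.min? h (fun y => y) with
    | none => h
    | some m =>
      let current := -m
      let eaten := PySem.Int.floordiv current 2
      let remaining := current - eaten
      let rest := (PySem.List.remove? h m).getD h
      fmwLoopA k (if remaining > 0 then rest ++ [-remaining] else rest)

def findMinWeight (weights : List Int) (d : Int) : Int :=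
  -(fmwLoopA d.toNat (weights.map (fun w => -w))).sum

-- ===== PORT B =====
-- the inner while/insert of Source B: walk past the elements ≥ r, put r there
def fmwInsDesc (r : Int) : List Int → List Int
  | [] => [r]
  | x :: t => if r ≤ x then x :: fmwInsDesc r t else r :: x :: t

-- 'if not items: break' is the [] case; items.pop(0) is the head pattern
def fmwLoopB : Nat → List Int → List Int
  | 0, l => l
  | _+1, [] => []
  | k+1, m :: t =>
      let r := m - PySem.Int.floordiv m 2
      fmwLoopB k (if r > 0 then fmwInsDesc r t else t)

def findMinWeight_alt (weights : List Int) (d : Int) : Int :=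
  (fmwLoopB d.toNat (PySem.List.sorted weights (fun y => y) true)).sum

-- ===== PRECONDITION & SPEC =====
def Spec_findMinWeight (weights : List Int) (d : Int) (out : Int) : Prop := out = findMinWeight_alt weights d
instance (weights : List Int) (d : Int) (out : Int) : Decidable (Spec_findMinWeight weights d out) := by unfold Spec_findMinWeight; infer_instance

-- ===== CLAIM =====
def Claim_equal_findMinWeight : Prop := ∀ (weights : List Int) (d : Int), Dom_findMinWeight weights d → Spec_findMinWeight weights d (findMinWeight weights d)

-- ===== LEMMAS AND PROOFS =====

theorem fmw_sum_map_neg (l : List Int) : (l.map (fun x => -x)).sum = -l.sum := by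
  induction l with
  | nil => simp
  | cons x t ih => simp [ih]; ring

theorem fmw_insDesc_perm (r : Int) (t : List Int) : (fmwInsDesc r t).Perm (r :: t) := by
  induction t with
  | nil => simp [fmwInsDesc]
  | cons x s ih =>
      by_cases h : r ≤ x
      · simpa [fmwInsDesc, h] using ((ih.cons x).trans (List.Perm.swap r x s))
      · simp [fmwInsDesc, h]

theorem fmw_insDesc_sorted (r : Int) (t : List Int) (ht : t.Pairwise (fun a b => b ≤ a)) :
    (fmwInsDesc r t).Pairwise (fun a b => b ≤ a) := by
  induction t with
  | nil => simp [fmwInsDesc]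
  | cons x s ih =>
      rcases List.pairwise_cons.mp ht with ⟨hx, hs⟩
      by_cases h : r ≤ x
      · rw [fmwInsDesc, if_pos h]
        refine List.pairwise_cons.mpr ⟨?_, ih hs⟩
        intro b hb
        rcases List.mem_cons.mp ((fmw_insDesc_perm r s).mem_iff.mp hb) with rfl | hb
        · exact h
        · exact hx b hb
      · rw [fmwInsDesc, if_neg h]
        refine List.pairwise_cons.mpr ⟨?_, ht⟩
        intro b hb
        rcases List.mem_cons.mp hb with rfl | hb
        · omega
        · have := hx b hb; omega

theorem fmw_sim : ∀ (k : Nat) (h l : List Int),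
    h.Perm (l.map (fun x => -x)) → l.Pairwise (fun a b => b ≤ a) →
    (fmwLoopA k h).sum = -((fmwLoopB k l).sum) := by
  intro k
  induction k with
  | zero =>
      intro h l hp _
      simp [fmwLoopA, fmwLoopB, hp.sum_eq, fmw_sum_map_neg]
  | succ k ih =>
      intro h l hp hs
      cases l with
      | nil =>
          have : h = [] := List.Perm.eq_nil (by simpa using hp)
          subst this
          simp [fmwLoopA, fmwLoopB, PySem.List.min?]
      | cons m t =>
          have hmem : (-m) ∈ h := hp.mem_iff.mpr (by simp)
          have hne : h ≠ [] := by intro e; subst e; simp at hmem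
          obtain ⟨m', hm'⟩ : ∃ m', PySem.List.min? h (fun y => y) = some m' := by
            cases e : PySem.List.min? h (fun y => y) with
            | none => exact absurd ((PySem.List.min?_eq_none_iff h (fun y => y)).mp e) hne
            | some v => exact ⟨v, rfl⟩ 
          have hm'mem : m' ∈ h := PySem.List.min?_mem hm'
          have hhead : ∀ b ∈ t, b ≤ m := (List.pairwise_cons.mp hs).1
          have hm'eq : m' = -m := by
            have h1 : m' ≤ -m := PySem.List.min?_isMin hm' (-m) hmem
            rcases List.mem_map.mp (hp.mem_iff.mp hm'mem) with ⟨y, hy, rfl⟩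
            rcases List.mem_cons.mp hy with rfl | hy
            · rfl
            · have := hhead y hy; omega
          subst hm'eq
          have herase : (h.erase (-m)).Perm (t.map (fun x => -x)) := by
            have := hp.erase (-m)
            simpa [List.erase_cons_head] using this
          have hrem : PySem.List.remove? h (-m) = some (h.erase (-m)) :=
            PySem.List.remove?_eq_some_erase h (-m) hmem
          rw [fmwLoopA, hm', fmwLoopB]
          simp only [hrem, Option.getD_some, neg_neg]
          set r := m - PySem.Int.floordiv m 2 with hr
          by_cases hrp : r > 0
          · rw [if_pos hrp, if_pos hrp]
            refine ih _ _ ?_ (fmw_insDesc_sorted r t (List.pairwise_cons.mp hs).2)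
            have p1 : (h.erase (-m) ++ [-r]).Perm ((-r) :: h.erase (-m)) :=
              List.perm_append_comm (l₁ := h.erase (-m)) (l₂ := [-r])
            have p2 : ((-r) :: h.erase (-m)).Perm ((-r) :: t.map (fun x => -x)) :=
              herase.cons _
            have p3 : ((fmwInsDesc r t).map (fun x => -x)).Perm ((-r) :: t.map (fun x => -x)) := by
              simpa using (fmw_insDesc_perm r t).map (fun x => -x)
            exact (p1.trans p2).trans p3.symm
          · rw [if_neg hrp, if_neg hrp]
            exact ih _ _ herase (List.pairwise_cons.mp hs).2

-- ===== VERDICT =====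
theorem findMinWeight_spec : Claim_equal_findMinWeight := by
  intro weights d _
  unfold Spec_findMinWeight findMinWeight findMinWeight_alt
  rw [fmw_sim d.toNat (weights.map (fun w => -w)) (PySem.List.sorted weights (fun y => y) true)
      ((PySem.List.sorted_perm weights (fun y => y) true).map (fun x => -x)).symm
      (PySem.List.sorted_pairwise_rev weights (fun y => y))]
  ring
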